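-- pv_equiv track=rewrite | github.com/DinisRosa/ATP_LEBIOM | projeto/projeto/Functions/DataSet_Subdivision.py | all_PublishDates
-- ===== SOURCE A (Python) =====
-- def all_PublishDates(base: list) -> dict:
--     PubDatesDict: dict[str, list[int]] = {}
--     for i, pub in enumerate(base):
--         if 'publish_date' in pub.keys():
--             date_key: str = pub['publish_date'][:11]
--             if date_key not in PubDatesDict:
--                 PubDatesDict[date_key] = [i]
--             else:
--                 PubDatesDict[date_key].append(i)
--     return {k: PubDatesDict[k] for k in sorted(PubDatesDict)}
-- ===== SOURCE B (Python) =====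
-- def all_PublishDates(base: list) -> dict:
--     # Different decomposition: flatten to (date-key, index) pairs once, then
--     # build the result per sorted distinct key by filtering that flat list.
--     keyed = [(pub['publish_date'][:11], i)
--              for i, pub in enumerate(base) if 'publish_date' in pub]
--     return {k: [i for kk, i in keyed if kk == k]
--             for k in sorted({k for k, _ in keyed})}
-- ===== Notes on version B (the rewrite author's own statement) =====
-- stated objective: alternative
-- what changed: A builds a dict of index-buckets incrementally (insert-or-append per record) and then re-emits it over its sorted keys; B instead flattens base once into a (date-key, index) pair list and builds each bucket by filtering that flat list per sorted distinct key, with no incremental dict at all.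
import Mathlib
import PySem

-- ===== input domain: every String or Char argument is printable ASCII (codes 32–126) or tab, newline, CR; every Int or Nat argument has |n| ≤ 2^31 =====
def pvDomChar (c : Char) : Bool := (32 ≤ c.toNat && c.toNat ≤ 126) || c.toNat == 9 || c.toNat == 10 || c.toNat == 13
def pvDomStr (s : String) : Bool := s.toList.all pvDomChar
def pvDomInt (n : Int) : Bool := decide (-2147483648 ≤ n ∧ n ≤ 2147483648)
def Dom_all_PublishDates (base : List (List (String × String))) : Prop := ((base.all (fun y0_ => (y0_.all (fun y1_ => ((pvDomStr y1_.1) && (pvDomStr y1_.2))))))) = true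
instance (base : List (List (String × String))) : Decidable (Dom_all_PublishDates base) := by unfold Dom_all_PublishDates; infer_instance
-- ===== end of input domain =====

-- B replaces A's incremental dict-bucketing (then sorting the keys) by a flat
-- (date-key, index) pair list grouped per sorted distinct key; objective: simpler.

-- ===== PORT A =====
-- A: dict built record by record ('if key not in dict: [i] else append'), then
-- sorted keys re-emitted.  pub is a Python dict parameter → association list,
-- lookup = first match (Dict.mk/get?).  d[k] at the end is ported as getD k []
-- (exact: k is drawn from d's own keys, so it is always present).
def pvStepA (d : PySem.Dict String (List Int)) (p : Int × List (String × String)) : PySem.Dict String (List Int) :=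
  match (PySem.Dict.mk p.2).get? "publish_date" with
  | none => d
  | some v =>
    let dateKey := PySem.Str.slice v none (some 11)
    if d.contains dateKey = false then d.insert dateKey [p.1]
    else d.modify dateKey [] (fun l => l ++ [p.1])
def pvDictA (base : List (List (String × String))) : PySem.Dict String (List Int) :=
  (PySem.List.enumerate base 0).foldl pvStepA PySem.Dict.empty
def all_PublishDates (base : List (List (String × String))) : List (String × List Int) :=
  (PySem.List.sorted (pvDictA base).keys (fun k => k) false).map
    (fun k => (k, (pvDictA base).getD k []))

-- ===== PORT B =====
-- B: one comprehension producing (date-key, index) pairs, then per sorted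
-- distinct key a filter over that flat list.
def pvKeyed (base : List (List (String × String))) : List (String × Int) :=
  (PySem.List.enumerate base 0).filterMap (fun p =>
    ((PySem.Dict.mk p.2).get? "publish_date").map
      (fun v => (PySem.Str.slice v none (some 11), p.1)))
def all_PublishDates_alt (base : List (List (String × String))) : List (String × List Int) :=
  (PySem.List.sorted (PySem.Set.ofList ((pvKeyed base).map (fun q => q.1))) (fun k => k) false).map
    (fun k => (k, ((pvKeyed base).filter (fun q => q.1 == k)).map (fun q => q.2)))

-- ===== PRECONDITION & SPEC =====
def Spec_all_PublishDates (base : List (List (String × String))) (out : List (String × List Int)) : Prop := out = all_PublishDates_alt base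
instance (base : List (List (String × String))) (out : List (String × List Int)) : Decidable (Spec_all_PublishDates base out) := by unfold Spec_all_PublishDates; infer_instance

-- ===== CLAIM (what is proved, stated in full; the proofs are below) =====
def Claim_equal_all_PublishDates : Prop := ∀ (base : List (List (String × String))), Dom_all_PublishDates base → Spec_all_PublishDates base (all_PublishDates base)

-- ===== LEMMAS AND PROOFS =====

-- A's two branches are exactly Dict.modify (append-with-default-[]).
theorem pv_branch_eq_modify (d : PySem.Dict String (List Int)) (k : String) (i : Int) :
    (if d.contains k = false then d.insert k [i] else d.modify k [] (fun l => l ++ [i]))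
      = d.modify k [] (fun l => l ++ [i]) := by
  by_cases h : d.contains k
  · simp [h]
  · have h' : d.contains k = false := by simpa using h
    rw [h', if_pos rfl, PySem.Dict.modify, PySem.Dict.getD_of_not_contains d ([] : List Int) h']
    rfl

-- A's loop over enumerated records equals the modify-fold over B's flat keyed list.
theorem pv_fold_eq (l : List (Int × List (String × String))) (d : PySem.Dict String (List Int)) :
    l.foldl pvStepA d
    = (l.filterMap (fun p =>
        ((PySem.Dict.mk p.2).get? "publish_date").map
          (fun v => (PySem.Str.slice v none (some 11), p.1)))).foldl
        (fun d q => d.modify q.1 [] (fun l => l ++ [q.2])) d := by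
  induction l generalizing d with
  | nil => rfl
  | cons p rest ih =>
    rw [List.foldl_cons, List.filterMap_cons]
    cases h : (PySem.Dict.mk p.2).get? "publish_date" with
    | none =>
      rw [show pvStepA d p = d from by simp [pvStepA, h]]
      simpa using ih d
    | some v =>
      rw [show pvStepA d p = d.modify (PySem.Str.slice v none (some 11)) [] (fun l => l ++ [p.1])
            from by simp only [pvStepA, h]; exact pv_branch_eq_modify ..]
      simpa using ih _

theorem pv_set_update_nil (xs : List String) :
    PySem.Set.update ([] : List String) xs = PySem.Set.ofList xs := by
  simp [PySem.Set.update_eq_append_filter, PySem.Set.contains]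

-- ===== VERDICT (by name: the statement is the Claim_ definition above) =====
theorem all_PublishDates_spec : Claim_equal_all_PublishDates := by
  intro base _
  show all_PublishDates base = all_PublishDates_alt base
  unfold all_PublishDates all_PublishDates_alt
  have hd : pvDictA base
      = (pvKeyed base).foldl (fun d q => d.modify q.1 [] (fun l => l ++ [q.2])) PySem.Dict.empty := by
    rw [pvDictA, pv_fold_eq, pvKeyed]
  rw [hd]
  rw [PySem.Dict.keys_foldl_modify_key (pvKeyed base) (fun q => q.1) ([] : List Int)
        (fun _ q l => l ++ [q.2]) PySem.Dict.empty]
  rw [PySem.Dict.keys_empty, pv_set_update_nil]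
  refine List.map_congr_left (fun k _ => ?_)
  rw [PySem.Dict.getD_foldl_modify_append, PySem.Dict.getD_empty]
  rfl
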